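-- pv_equiv track=rewrite | github.com/Sooyong97/Algorithm | 프로그래머스/1/42862. 체육복/체육복.py | solution
-- ===== SOURCE A (Python) =====
-- def solution(n, lost, reserve):
--     actual_reserve = set(reserve) - set(lost)
--     actual_lost = set(lost) - set(reserve)
--
--     for l in sorted(actual_lost):
--         if l - 1 in actual_reserve:
--             actual_reserve.remove(l - 1)
--         elif l + 1 in actual_reserve:
--             actual_reserve.remove(l + 1)
--         else:
--             n -= 1
--
--     return n
-- ===== SOURCE B (Python) =====
-- def solution(n, lost, reserve):
--     # Two-pointer merge over the two sorted disjoint sets instead of hash-set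
--     # membership tests with removals: reserves smaller than l-1 can never help
--     # any later lost student, so a single forward pointer suffices.
--     L = sorted(set(lost) - set(reserve))
--     R = sorted(set(reserve) - set(lost))
--     j = 0
--     miss = 0
--     for l in L:
--         while j < len(R) and R[j] < l - 1:
--             j += 1
--         if j < len(R) and (R[j] == l - 1 or R[j] == l + 1):
--             j += 1
--         else:
--             miss += 1
--     return n - miss
-- ===== Notes on version B (the rewrite author's own statement) =====
-- stated objective: alternative
-- what changed: Replaces the mutable hash-set greedy (membership test and removal on the reserve set per lost student) by a two-pointer merge of the two sorted disjoint lists with a single forward index that skips reserves too small to ever help again.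
import Mathlib
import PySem

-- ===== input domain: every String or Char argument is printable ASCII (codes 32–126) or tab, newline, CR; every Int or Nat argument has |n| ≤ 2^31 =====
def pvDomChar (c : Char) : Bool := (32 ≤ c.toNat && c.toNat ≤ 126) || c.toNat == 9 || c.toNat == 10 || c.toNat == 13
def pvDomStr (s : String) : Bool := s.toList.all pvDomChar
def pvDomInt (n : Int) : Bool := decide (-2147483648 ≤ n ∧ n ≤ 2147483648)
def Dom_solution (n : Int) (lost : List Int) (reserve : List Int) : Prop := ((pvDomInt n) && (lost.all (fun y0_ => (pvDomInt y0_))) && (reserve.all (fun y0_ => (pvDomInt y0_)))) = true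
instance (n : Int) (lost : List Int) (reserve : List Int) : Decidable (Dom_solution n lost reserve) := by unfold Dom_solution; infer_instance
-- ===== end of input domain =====

-- B replaces A's hash-set greedy by a two-pointer merge of the two sorted disjoint lists (alternative structure, same cost).

-- ===== PORT A =====
-- loop body of A's for-loop over sorted(actual_lost); state = (actual_reserve, n).
-- 'set.remove(x)' is ported as Set.discard: exact here because each removal is guarded by the membership test just taken.
def aStep (st : PySem.Set Int × Int) (l : Int) : PySem.Set Int × Int :=
  if l - 1 ∈ st.1 then (PySem.Set.discard st.1 (l - 1), st.2)
  else if l + 1 ∈ st.1 then (PySem.Set.discard st.1 (l + 1), st.2)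
  else (st.1, st.2 - 1)

def solution (n : Int) (lost : List Int) (reserve : List Int) : Int :=
  let actual_reserve : PySem.Set Int := PySem.Set.diff (PySem.Set.ofList reserve) (PySem.Set.ofList lost)
  let actual_lost : PySem.Set Int := PySem.Set.diff (PySem.Set.ofList lost) (PySem.Set.ofList reserve)
  ((PySem.List.sorted actual_lost (fun x => x) false).foldl aStep (actual_reserve, n)).2

-- ===== PORT B =====
-- the 'while' skip: advance past reserves smaller than l - 1
def skipSmall (l : Int) (R : List Int) : List Int := R.dropWhile (fun r => decide (r < l - 1))

-- B's for-loop over L, carrying the remaining reserve suffix and the miss accumulator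
def missCount : List Int → List Int → Int → Int
  | [], _, miss => miss
  | l :: ls, R, miss =>
    match skipSmall l R with
    | r :: rs => if r = l - 1 ∨ r = l + 1 then missCount ls rs miss else missCount ls (r :: rs) (miss + 1)
    | [] => missCount ls [] (miss + 1)

def solution_alt (n : Int) (lost : List Int) (reserve : List Int) : Int :=
  let L := PySem.List.sorted (PySem.Set.diff (PySem.Set.ofList lost) (PySem.Set.ofList reserve)) (fun x => x) false
  let R := PySem.List.sorted (PySem.Set.diff (PySem.Set.ofList reserve) (PySem.Set.ofList lost)) (fun x => x) false
  n - missCount L R 0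

-- ===== PRECONDITION & SPEC =====
def Spec_solution (n : Int) (lost : List Int) (reserve : List Int) (out : Int) : Prop := out = solution_alt n lost reserve
instance (n : Int) (lost : List Int) (reserve : List Int) (out : Int) : Decidable (Spec_solution n lost reserve out) := by unfold Spec_solution; infer_instance

-- ===== CLAIM (what is proved, stated in full; the proofs are below) =====
def Claim_equal_solution : Prop := ∀ (n : Int) (lost : List Int) (reserve : List Int), Dom_solution n lost reserve → Spec_solution n lost reserve (solution n lost reserve)

-- ===== LEMMAS AND PROOFS =====

-- the elements dropWhile removed were all below l - 1
theorem mem_take_lt (l : Int) (R : List Int) :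
    ∀ x ∈ R.takeWhile (fun r => decide (r < l - 1)), x < l - 1 := by
  intro x hx
  have := List.mem_takeWhile_imp hx
  simpa using this

-- an element ≥ l - 1 of R survives the skip
theorem mem_skip (l : Int) (R : List Int) (x : Int) (hx : x ∈ R) (hge : l - 1 ≤ x) :
    x ∈ skipSmall l R := by
  have hsplit := List.takeWhile_append_dropWhile (p := fun r => decide (r < l - 1)) (l := R)
  rw [← hsplit] at hx
  rcases List.mem_append.mp hx with h | h
  · exact absurd (mem_take_lt l R x h) (by omega)
  · exact h

theorem skip_subset (l : Int) (R : List Int) : ∀ x ∈ skipSmall l R, x ∈ R := by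
  intro x hx; exact (List.dropWhile_sublist _).subset hx

theorem skip_head_ge (l r : Int) (R rs : List Int) (h : skipSmall l R = r :: rs) : l - 1 ≤ r := by
  have h' : R.dropWhile (fun r => decide (r < l - 1)) = r :: rs := h
  have hne : R.dropWhile (fun r => decide (r < l - 1)) ≠ [] := by simp [h']
  have := List.head_dropWhile_not (fun r => decide (r < l - 1)) hne
  simp only [h', List.head_cons] at this
  simpa using this

theorem key_invariant (L : List Int) : ∀ (S R : List Int) (n miss : Int),
    L.Pairwise (· < ·) →
    R.Pairwise (· < ·) →
    (∀ x ∈ R, x ∈ S) →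
    (∀ x ∈ S, x ∉ R → ∀ l ∈ L, x < l - 1) →
    (∀ l ∈ L, l ∉ S) →
    (L.foldl aStep (S, n)).2 + missCount L R miss = n + miss := by
  induction L with
  | nil => intro S R n miss _ _ _ _ _; simp [missCount]
  | cons l ls ih =>
    intro S R n miss hL hR hRS hSmall hDisj
    rw [List.pairwise_cons] at hL
    obtain ⟨hl_lt, hls⟩ := hL
    have hlS : l ∉ S := hDisj l (List.mem_cons_self)
    have hDisj' : ∀ l' ∈ ls, l' ∉ S := fun l' h => hDisj l' (List.mem_cons_of_mem _ h)
    -- membership in S of a value ≥ l - 1 is membership in the skipped suffix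
    have memS_iff : ∀ a : Int, l - 1 ≤ a → (a ∈ S ↔ a ∈ skipSmall l R) := by
      intro a ha
      constructor
      · intro haS
        by_cases haR : a ∈ R
        · exact mem_skip l R a haR ha
        · have := hSmall a haS haR l (List.mem_cons_self); omega
      · intro h; exact hRS a (skip_subset l R a h)
    -- elements of R dropped by the skip are small for every later lost student
    have dropped_small : ∀ x ∈ R, x ∉ skipSmall l R → ∀ l' ∈ ls, x < l' - 1 := by
      intro x hx hnx l' hl'
      have hxlt : x < l - 1 := by
        by_contra hge
        exact hnx (mem_skip l R x hx (by omega))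
      have := hl_lt l' hl'
      omega
    have hSmall' : ∀ x ∈ S, x ∉ skipSmall l R → ∀ l' ∈ ls, x < l' - 1 := by
      intro x hxS hnx l' hl'
      by_cases hxR : x ∈ R
      · exact dropped_small x hxR hnx l' hl'
      · have := hSmall x hxS hxR l' (List.mem_cons_of_mem _ hl')
        omega
    have hskip_pw : (skipSmall l R).Pairwise (· < ·) := hR.sublist (List.dropWhile_sublist _)
    rw [List.foldl_cons]
    cases hR' : skipSmall l R with
    | nil =>
      -- no usable reserve: both miss
      have h1 : l - 1 ∉ S := fun h => by simpa [hR'] using (memS_iff (l - 1) (by omega)).mp h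
      have h2 : l + 1 ∉ S := fun h => by simpa [hR'] using (memS_iff (l + 1) (by omega)).mp h
      have hstep : aStep (S, n) l = (S, n - 1) := by simp [aStep, h1, h2]
      rw [hstep]
      simp only [missCount, hR']
      have := ih S [] (n - 1) (miss + 1) hls (by simp) (by simp)
        (fun x hx _ => hSmall' x hx (by simp [hR']))
        hDisj'
      omega
    | cons r rs =>
      have hr_ge : l - 1 ≤ r := skip_head_ge l r R rs hR'
      have hrS : r ∈ S := hRS r (skip_subset l R r (by rw [hR']; exact List.mem_cons_self))
      have hr_ne_l : r ≠ l := fun h => hlS (h ▸ hrS)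
      rw [hR', List.pairwise_cons] at hskip_pw
      obtain ⟨hr_lt_rs, hrs_pw⟩ := hskip_pw
      simp only [missCount, hR']
      by_cases hcase1 : r = l - 1
      · -- lend from the left neighbour
        have h1 : l - 1 ∈ S := hcase1 ▸ hrS
        have hstep : aStep (S, n) l = (PySem.Set.discard S (l - 1), n) := by simp [aStep, h1]
        rw [hstep, if_pos (Or.inl hcase1)]
        have hrs_sub : ∀ x ∈ rs, x ∈ PySem.Set.discard S (l - 1) := by
          intro x hx
          have hxR' : x ∈ skipSmall l R := by rw [hR']; exact List.mem_cons_of_mem _ hx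
          refine (PySem.Set.mem_discard S (l - 1) x).mpr ⟨hRS x (skip_subset l R x hxR'), ?_⟩
          have := hr_lt_rs x hx; omega
        have hSmall'' : ∀ x ∈ PySem.Set.discard S (l - 1), x ∉ rs → ∀ l' ∈ ls, x < l' - 1 := by
          intro x hx hnx l' hl'
          obtain ⟨hxS, hxne⟩ := (PySem.Set.mem_discard S (l - 1) x).mp hx
          refine hSmall' x hxS ?_ l' hl'
          rw [hR']; intro hmem
          rcases List.mem_cons.mp hmem with h | h
          · exact hxne (h.trans hcase1)
          · exact hnx h
        have hDisj'' : ∀ l' ∈ ls, l' ∉ PySem.Set.discard S (l - 1) := by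
          intro l' hl' h
          exact hDisj' l' hl' ((PySem.Set.mem_discard S (l - 1) l').mp h).1
        exact ih (PySem.Set.discard S (l - 1)) rs n miss hls hrs_pw hrs_sub hSmall'' hDisj''
      · -- head is not l - 1, so l - 1 is not available at all
        have h1 : l - 1 ∉ S := by
          intro h
          have := (memS_iff (l - 1) (by omega)).mp h
          rw [hR'] at this
          rcases List.mem_cons.mp this with h' | h'
          · exact hcase1 h'.symm
          · have := hr_lt_rs _ h'; omega
        by_cases hcase2 : r = l + 1
        · -- lend from the right neighbour
          have h2 : l + 1 ∈ S := hcase2 ▸ hrS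
          have hstep : aStep (S, n) l = (PySem.Set.discard S (l + 1), n) := by simp [aStep, h1, h2]
          rw [hstep, if_pos (Or.inr hcase2)]
          have hrs_sub : ∀ x ∈ rs, x ∈ PySem.Set.discard S (l + 1) := by
            intro x hx
            have hxR' : x ∈ skipSmall l R := by rw [hR']; exact List.mem_cons_of_mem _ hx
            refine (PySem.Set.mem_discard S (l + 1) x).mpr ⟨hRS x (skip_subset l R x hxR'), ?_⟩
            have := hr_lt_rs x hx; omega
          have hSmall'' : ∀ x ∈ PySem.Set.discard S (l + 1), x ∉ rs → ∀ l' ∈ ls, x < l' - 1 := by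
            intro x hx hnx l' hl'
            obtain ⟨hxS, hxne⟩ := (PySem.Set.mem_discard S (l + 1) x).mp hx
            refine hSmall' x hxS ?_ l' hl'
            rw [hR']; intro hmem
            rcases List.mem_cons.mp hmem with h | h
            · exact hxne (h.trans hcase2)
            · exact hnx h
          have hDisj'' : ∀ l' ∈ ls, l' ∉ PySem.Set.discard S (l + 1) := by
            intro l' hl' h
            exact hDisj' l' hl' ((PySem.Set.mem_discard S (l + 1) l').mp h).1
          exact ih (PySem.Set.discard S (l + 1)) rs n miss hls hrs_pw hrs_sub hSmall'' hDisj''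
        · -- head ≥ l + 2: nothing usable, both miss
          have hr_big : l + 1 < r := by
            rcases lt_or_eq_of_le hr_ge with h | h
            · omega
            · exact absurd h.symm hcase1
          have h2 : l + 1 ∉ S := by
            intro h
            have := (memS_iff (l + 1) (by omega)).mp h
            rw [hR'] at this
            rcases List.mem_cons.mp this with h' | h'
            · omega
            · have := hr_lt_rs _ h'; omega
          have hstep : aStep (S, n) l = (S, n - 1) := by simp [aStep, h1, h2]
          rw [hstep, if_neg (fun h => h.elim hcase1 hcase2)]
          have hsub : ∀ x ∈ r :: rs, x ∈ S := by
            intro x hx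
            exact hRS x (skip_subset l R x (hR' ▸ hx))
          have hSmall'' : ∀ x ∈ S, x ∉ r :: rs → ∀ l' ∈ ls, x < l' - 1 := by
            intro x hx hnx l' hl'
            exact hSmall' x hx (by rw [hR']; exact hnx) l' hl'
          have := ih S (r :: rs) (n - 1) (miss + 1) hls (List.pairwise_cons.mpr ⟨hr_lt_rs, hrs_pw⟩)
            hsub hSmall'' hDisj'
          omega

-- pairwise ≤ plus nodup gives strictly increasing
theorem pairwise_lt_of_sorted_nodup (xs : List Int) (hnd : xs.Nodup) :
    (PySem.List.sorted xs (fun x => x) false).Pairwise (· < ·) := by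
  have h1 := PySem.List.sorted_pairwise xs (fun x => x)
  have h2 : (PySem.List.sorted xs (fun x => x) false).Nodup :=
    (PySem.List.sorted_perm xs (fun x => x) false).nodup_iff.mpr hnd
  exact (h1.and h2).imp (fun h => lt_of_le_of_ne h.1 h.2)

-- ===== VERDICT (by name: the statement is the Claim_ definition above) =====
theorem solution_spec : Claim_equal_solution := by
  intro n lost reserve _
  unfold Spec_solution solution solution_alt
  show (List.foldl aStep (PySem.Set.diff (PySem.Set.ofList reserve) (PySem.Set.ofList lost), n)
      (PySem.List.sorted (PySem.Set.diff (PySem.Set.ofList lost) (PySem.Set.ofList reserve)) (fun x => x) false)).2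
    = n - missCount (PySem.List.sorted (PySem.Set.diff (PySem.Set.ofList lost) (PySem.Set.ofList reserve)) (fun x => x) false)
        (PySem.List.sorted (PySem.Set.diff (PySem.Set.ofList reserve) (PySem.Set.ofList lost)) (fun x => x) false) 0
  have hndL : (PySem.Set.diff (PySem.Set.ofList lost) (PySem.Set.ofList reserve)).Nodup :=
    PySem.Set.nodup_diff (s := PySem.Set.ofList lost) (t := PySem.Set.ofList reserve) (PySem.Set.nodup_ofList lost)
  have hndR : (PySem.Set.diff (PySem.Set.ofList reserve) (PySem.Set.ofList lost)).Nodup :=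
    PySem.Set.nodup_diff (s := PySem.Set.ofList reserve) (t := PySem.Set.ofList lost) (PySem.Set.nodup_ofList reserve)
  have key := key_invariant
    (PySem.List.sorted (PySem.Set.diff (PySem.Set.ofList lost) (PySem.Set.ofList reserve)) (fun x => x) false)
    (PySem.Set.diff (PySem.Set.ofList reserve) (PySem.Set.ofList lost))
    (PySem.List.sorted (PySem.Set.diff (PySem.Set.ofList reserve) (PySem.Set.ofList lost)) (fun x => x) false)
    n 0
    (pairwise_lt_of_sorted_nodup _ hndL)
    (pairwise_lt_of_sorted_nodup _ hndR)
    (fun x hx => (PySem.List.mem_sorted _ _ _ x).mp hx)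
    (fun x hxS hxR => absurd ((PySem.List.mem_sorted _ _ _ x).mpr hxS) hxR)
    (fun l hl hlS => by
      have h1 := (PySem.Set.mem_diff (PySem.Set.ofList lost) (PySem.Set.ofList reserve) l).mp
        ((PySem.List.mem_sorted _ _ _ l).mp hl)
      have h2 := (PySem.Set.mem_diff (PySem.Set.ofList reserve) (PySem.Set.ofList lost) l).mp hlS
      exact h1.2 h2.1)
  omega
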